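-- pv_equiv track=rewrite | github.com/Miensoap/Pystudy | CodeTree/2_프로그래밍연습/2_6_완전탐색1/124_Carry피하기2.py | ver_max
-- ===== SOURCE A (Python) =====
-- def ver_max(arr):
--     maxn=0
--     for i in range(len(arr)):
--         for j in range(len(arr)):
--             for k in range(len(arr)):
--                 if j!=i!=k:
--                     maxn=max(maxn,arr[i]+arr[j]+arr[k])
--     return maxn
-- ===== SOURCE B (Python) =====
-- def ver_max(arr):
--     if len(arr) < 2:
--         return 0
--     m1, m2 = (arr[0], arr[1]) if arr[0] >= arr[1] else (arr[1], arr[0])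
--     for x in arr[2:]:
--         if x > m1:
--             m1, m2 = x, m1
--         elif x > m2:
--             m2 = x
--     return max(0, 2 * m1 + m2)
-- ===== Notes on version B (the rewrite author's own statement) =====
-- stated objective: faster
-- what changed: Replaced the O(n^3) triple loop over all index triples by a single pass keeping the top two values and returning max(0, 2*max1 + max2).
import Mathlib
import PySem

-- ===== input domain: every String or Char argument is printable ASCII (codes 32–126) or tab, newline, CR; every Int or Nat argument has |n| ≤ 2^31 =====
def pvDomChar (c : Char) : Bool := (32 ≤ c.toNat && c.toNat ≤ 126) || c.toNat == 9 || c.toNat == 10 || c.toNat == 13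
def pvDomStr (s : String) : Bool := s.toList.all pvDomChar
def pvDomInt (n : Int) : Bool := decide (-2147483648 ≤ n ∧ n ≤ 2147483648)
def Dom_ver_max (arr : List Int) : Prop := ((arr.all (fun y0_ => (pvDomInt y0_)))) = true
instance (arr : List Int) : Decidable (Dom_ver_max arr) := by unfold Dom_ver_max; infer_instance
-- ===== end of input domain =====

-- B replaces A's O(n^3) triple loop by a single pass keeping the top two values (faster, asymptotic).

-- ===== PORT A =====
-- Literal transliteration of A: three nested for-loops over range(len(arr)),
-- accumulator maxn starting at 0. arr[i] is ported with pyGetD (exact here: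
-- every index produced by range(len(arr)) is in range).
def ver_max (arr : List Int) : Int :=
  (PySem.List.pyRange 0 (arr.length : Int) 1).foldl (fun maxn i =>
    (PySem.List.pyRange 0 (arr.length : Int) 1).foldl (fun maxn j =>
      (PySem.List.pyRange 0 (arr.length : Int) 1).foldl (fun maxn k =>
        if j ≠ i ∧ i ≠ k then
          max maxn (PySem.List.pyGetD arr i 0 + PySem.List.pyGetD arr j 0 + PySem.List.pyGetD arr k 0)
        else maxn) maxn) maxn) 0

-- ===== PORT B =====
-- the single pass over arr[2:] updating the top-two pair (m1, m2)
def topTwo : List Int → Int → Int → Int × Int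
  | [], m1, m2 => (m1, m2)
  | x :: xs, m1, m2 =>
    if x > m1 then topTwo xs x m1
    else if x > m2 then topTwo xs m1 x
    else topTwo xs m1 m2

def ver_max_alt (arr : List Int) : Int :=
  match arr with
  | a :: b :: rest =>
    let p := if a ≥ b then (a, b) else (b, a)
    let q := topTwo rest p.1 p.2
    max 0 (2 * q.1 + q.2)
  | _ => 0

-- ===== PRECONDITION & SPEC =====
def Spec_ver_max (arr : List Int) (out : Int) : Prop := out = ver_max_alt arr
instance (arr : List Int) (out : Int) : Decidable (Spec_ver_max arr out) := by unfold Spec_ver_max; infer_instance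

-- ===== CLAIM (what is proved, stated in full; the proofs are below) =====
def Claim_equal_ver_max : Prop := ∀ (arr : List Int), Dom_ver_max arr → Spec_ver_max arr (ver_max arr)

-- ===== LEMMAS AND PROOFS =====

-- the value A repeatedly folds max over
def candSum (arr : List Int) (i j k : Int) : Int :=
  PySem.List.pyGetD arr i 0 + PySem.List.pyGetD arr j 0 + PySem.List.pyGetD arr k 0

-- "v is one of the sums A's triple loop considers"
def Cand (arr : List Int) (v : Int) : Prop :=
  ∃ i j k : Int,
    i ∈ PySem.List.pyRange 0 (arr.length : Int) 1 ∧
    j ∈ PySem.List.pyRange 0 (arr.length : Int) 1 ∧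
    k ∈ PySem.List.pyRange 0 (arr.length : Int) 1 ∧
    j ≠ i ∧ i ≠ k ∧ v = candSum arr i j k

-- generic characterisation of a foldl whose step only ever raises the
-- accumulator to a candidate value
theorem foldl_max_char {α : Type} (g : Int → α → Int) (C : α → Int → Prop)
    (hmono : ∀ a x, a ≤ g a x)
    (hub : ∀ a x v, C x v → v ≤ g a x)
    (hcases : ∀ a x, g a x = a ∨ C x (g a x)) :
    ∀ (l : List α) (a : Int),
      a ≤ l.foldl g a ∧ (∀ x ∈ l, ∀ v, C x v → v ≤ l.foldl g a) ∧
      (l.foldl g a = a ∨ ∃ x ∈ l, C x (l.foldl g a)) := by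
  intro l
  induction l with
  | nil => intro a; simp
  | cons x xs ih =>
    intro a
    obtain ⟨h1, h2, h3⟩ := ih (g a x)
    refine ⟨le_trans (hmono a x) h1, ?_, ?_⟩
    · intro y hy v hv
      rcases List.mem_cons.mp hy with rfl | hy
      · exact le_trans (hub a y v hv) h1
      · exact h2 y hy v hv
    · rcases h3 with h3 | ⟨y, hy, hC⟩
      · rcases hcases a x with hc | hc
        · left; simpa [h3] using hc
        · right
          refine ⟨x, List.mem_cons_self, ?_⟩
          simpa [h3] using hc
      · right; exact ⟨y, List.mem_cons_of_mem _ hy, hC⟩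

-- characterisation of A's result
theorem verMax_char (arr : List Int) :
    0 ≤ ver_max arr ∧ (∀ v, Cand arr v → v ≤ ver_max arr) ∧
    (ver_max arr = 0 ∨ Cand arr (ver_max arr)) := by
  have L3 := fun (i j : Int) =>
    foldl_max_char (fun a k => if j ≠ i ∧ i ≠ k then max a (candSum arr i j k) else a)
      (fun k v => (j ≠ i ∧ i ≠ k) ∧ v = candSum arr i j k)
      (by intro a k; dsimp only; split_ifs
          · exact le_max_left _ _
          · exact le_rfl)
      (by rintro a k v ⟨hc, hv⟩; dsimp only; rw [if_pos hc, hv]; exact le_max_right _ _)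
      (by intro a k; dsimp only; by_cases hc : j ≠ i ∧ i ≠ k
          · rw [if_pos hc]
            rcases max_choice a (candSum arr i j k) with hm | hm
            · exact Or.inl hm
            · exact Or.inr ⟨hc, hm⟩
          · exact Or.inl (if_neg hc))
  have L2 := fun (i : Int) =>
    foldl_max_char
      (fun a j => (PySem.List.pyRange 0 (arr.length : Int) 1).foldl
        (fun a k => if j ≠ i ∧ i ≠ k then max a (candSum arr i j k) else a) a)
      (fun j v => ∃ k ∈ PySem.List.pyRange 0 (arr.length : Int) 1,
        (j ≠ i ∧ i ≠ k) ∧ v = candSum arr i j k)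
      (by intro a j; exact (L3 i j _ a).1)
      (by rintro a j v ⟨k, hk, hc, hv⟩; exact (L3 i j _ a).2.1 k hk v ⟨hc, hv⟩)
      (by intro a j
          rcases (L3 i j _ a).2.2 with h | ⟨k, hk, hc⟩
          · exact Or.inl h
          · exact Or.inr ⟨k, hk, hc⟩)
  have L1 :=
    foldl_max_char
      (fun a i => (PySem.List.pyRange 0 (arr.length : Int) 1).foldl
        (fun a j => (PySem.List.pyRange 0 (arr.length : Int) 1).foldl
          (fun a k => if j ≠ i ∧ i ≠ k then max a (candSum arr i j k) else a) a) a)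
      (fun i v => ∃ j ∈ PySem.List.pyRange 0 (arr.length : Int) 1,
        ∃ k ∈ PySem.List.pyRange 0 (arr.length : Int) 1,
        (j ≠ i ∧ i ≠ k) ∧ v = candSum arr i j k)
      (by intro a i; exact (L2 i _ a).1)
      (by rintro a i v ⟨j, hj, k, hk, hc, hv⟩; exact (L2 i _ a).2.1 j hj v ⟨k, hk, hc, hv⟩)
      (by intro a i
          rcases (L2 i _ a).2.2 with h | ⟨j, hj, hx⟩
          · exact Or.inl h
          · exact Or.inr ⟨j, hj, hx⟩)
  obtain ⟨h1, h2, h3⟩ := L1 (PySem.List.pyRange 0 (arr.length : Int) 1) 0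
  have hvm : ver_max arr = (PySem.List.pyRange 0 (arr.length : Int) 1).foldl
      (fun a i => (PySem.List.pyRange 0 (arr.length : Int) 1).foldl
        (fun a j => (PySem.List.pyRange 0 (arr.length : Int) 1).foldl
          (fun a k => if j ≠ i ∧ i ≠ k then max a (candSum arr i j k) else a) a) a) 0 := rfl
  rw [hvm]
  refine ⟨h1, ?_, ?_⟩
  · rintro v ⟨i, j, k, hi, hj, hk, hji, hik, hv⟩
    exact h2 i hi v ⟨j, hj, k, hk, ⟨hji, hik⟩, hv⟩
  · rcases h3 with h | ⟨i, hi, j, hj, k, hk, ⟨hji, hik⟩, hv⟩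
    · exact Or.inl h
    · exact Or.inr ⟨i, j, k, hi, hj, hk, hji, hik, hv⟩

-- loop invariant of B's top-two pass, stated over indices of the traversed list
def TTInv (l : List Int) (m1 m2 : Int) : Prop :=
  m2 ≤ m1 ∧
  (∃ t s : Nat, t < l.length ∧ s < l.length ∧ t ≠ s ∧ l.getD t 0 = m1 ∧ l.getD s 0 = m2) ∧
  (∀ i : Nat, i < l.length → l.getD i 0 ≤ m1) ∧
  (∀ p q : Nat, p < l.length → q < l.length → p ≠ q → l.getD p 0 ≤ m2 ∨ l.getD q 0 ≤ m2)

theorem getD_snoc (l : List Int) (x : Int) (i : Nat) :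
    (l ++ [x]).getD i 0 = if i < l.length then l.getD i 0 else if i = l.length then x else 0 := by
  rcases lt_trichotomy i l.length with h | h | h
  · rw [if_pos h]
    simp [List.getD, List.getElem?_append_left h]
  · subst h
    simp [List.getD]
  · rw [if_neg (by omega), if_neg (by omega)]
    simp [List.getD, List.getElem?_eq_none (by simp; omega : (l ++ [x]).length ≤ i)]

theorem inv_step (seen : List Int) (m1 m2 x : Int) (h : TTInv seen m1 m2) :
    TTInv (seen ++ [x])
      (if x > m1 then x else m1)
      (if x > m1 then m1 else if x > m2 then x else m2) := by
  obtain ⟨hle, ⟨t, s, ht, hs, hts, htv, hsv⟩, hub, hpair⟩ := h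
  by_cases h1 : x > m1
  · rw [if_pos h1, if_pos h1]
    refine ⟨le_of_lt h1, ⟨seen.length, t, by simp, by simp; omega, by omega, ?_, ?_⟩, ?_, ?_⟩
    · rw [getD_snoc, if_neg (by omega), if_pos rfl]
    · rw [getD_snoc, if_pos ht]; exact htv
    · intro i hi
      rw [getD_snoc]
      split_ifs with hi1 hi2
      · exact le_of_lt (lt_of_le_of_lt (hub i hi1) h1)
      · exact le_rfl
      · simp at hi; omega
    · intro p q hp hq hpq
      simp at hp hq
      by_cases hpl : p < seen.length
      · exact Or.inl (by rw [getD_snoc, if_pos hpl]; exact hub p hpl)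
      · refine Or.inr ?_
        have hql : q < seen.length := by omega
        rw [getD_snoc, if_pos hql]; exact hub q hql
  · rw [if_neg h1, if_neg h1]
    have hxm1 : x ≤ m1 := by omega
    by_cases h2 : x > m2
    · rw [if_pos h2]
      refine ⟨hxm1, ⟨t, seen.length, by simp; omega, by simp, by omega, ?_, ?_⟩, ?_, ?_⟩
      · rw [getD_snoc, if_pos ht]; exact htv
      · rw [getD_snoc, if_neg (by omega), if_pos rfl]
      · intro i hi
        rw [getD_snoc]
        split_ifs with hi1 hi2
        · exact hub i hi1
        · exact hxm1
        · simp at hi; omega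
      · intro p q hp hq hpq
        simp at hp hq
        by_cases hpl : p < seen.length
        · by_cases hql : q < seen.length
          · rcases hpair p q hpl hql hpq with hc | hc
            · exact Or.inl (by rw [getD_snoc, if_pos hpl]; omega)
            · exact Or.inr (by rw [getD_snoc, if_pos hql]; omega)
          · exact Or.inr (by rw [getD_snoc, if_neg (by omega), if_pos (by omega)])
        · exact Or.inl (by rw [getD_snoc, if_neg (by omega), if_pos (by omega)])
    · rw [if_neg h2]
      have hxm2 : x ≤ m2 := by omega
      refine ⟨hle, ⟨t, s, by simp; omega, by simp; omega, hts, ?_, ?_⟩, ?_, ?_⟩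
      · rw [getD_snoc, if_pos ht]; exact htv
      · rw [getD_snoc, if_pos hs]; exact hsv
      · intro i hi
        rw [getD_snoc]
        split_ifs with hi1 hi2
        · exact hub i hi1
        · omega
        · simp at hi; omega
      · intro p q hp hq hpq
        simp at hp hq
        by_cases hpl : p < seen.length
        · by_cases hql : q < seen.length
          · rcases hpair p q hpl hql hpq with hc | hc
            · exact Or.inl (by rw [getD_snoc, if_pos hpl]; exact hc)
            · exact Or.inr (by rw [getD_snoc, if_pos hql]; exact hc)
          · exact Or.inr (by rw [getD_snoc, if_neg (by omega), if_pos (by omega)]; exact hxm2)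
        · exact Or.inl (by rw [getD_snoc, if_neg (by omega), if_pos (by omega)]; exact hxm2)

theorem topTwo_inv : ∀ (xs seen : List Int) (m1 m2 : Int), TTInv seen m1 m2 →
    TTInv (seen ++ xs) (topTwo xs m1 m2).1 (topTwo xs m1 m2).2 := by
  intro xs
  induction xs with
  | nil => intro seen m1 m2 h; simpa [topTwo] using h
  | cons x xs ih =>
    intro seen m1 m2 h
    have hstep := inv_step seen m1 m2 x h
    have := ih (seen ++ [x]) _ _ hstep
    rw [List.append_assoc] at this
    by_cases h1 : x > m1
    · simpa [topTwo, h1] using this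
    · by_cases h2 : x > m2
      · simpa [topTwo, h1, h2] using this
      · simpa [topTwo, h1, h2] using this

theorem inv_init (a b : Int) :
    TTInv [a, b] (if a ≥ b then a else b) (if a ≥ b then b else a) := by
  by_cases hab : a ≥ b
  · rw [if_pos hab, if_pos hab]
    refine ⟨hab, ⟨0, 1, by simp, by simp, by omega, by simp, by simp⟩, ?_, ?_⟩
    · intro i hi
      simp at hi
      interval_cases i <;> simp <;> omega
    · intro p q hp hq hpq
      simp at hp hq
      interval_cases p <;> interval_cases q <;> simp <;> omega
  · rw [if_neg hab, if_neg hab]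
    refine ⟨by omega, ⟨1, 0, by simp, by simp, by omega, by simp, by simp⟩, ?_, ?_⟩
    · intro i hi
      simp at hi
      interval_cases i <;> simp <;> omega
    · intro p q hp hq hpq
      simp at hp hq
      interval_cases p <;> interval_cases q <;> simp <;> omega

-- any candidate sum is at most 2*m1 + m2
theorem cand_le (arr : List Int) (m1 m2 : Int) (h : TTInv arr m1 m2) :
    ∀ v, Cand arr v → v ≤ 2 * m1 + m2 := by
  obtain ⟨hle, _, hub, hpair⟩ := h
  rintro v ⟨i, j, k, hi, hj, hk, hji, hik, hv⟩
  rw [PySem.List.mem_pyRange_one] at hi hj hk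
  have hi' : i = ((i.toNat : Nat) : Int) := by omega
  have hj' : j = ((j.toNat : Nat) : Int) := by omega
  have hk' : k = ((k.toNat : Nat) : Int) := by omega
  rw [hv]
  unfold candSum
  rw [hi', hj', hk']
  simp only [PySem.List.pyGetD_natCast]
  have hiL : i.toNat < arr.length := by omega
  have hjL : j.toNat < arr.length := by omega
  have hkL : k.toNat < arr.length := by omega
  have hbi := hub i.toNat hiL
  have hbj := hub j.toNat hjL
  have hbk := hub k.toNat hkL
  rcases hpair i.toNat j.toNat hiL hjL (by omega) with hc1 | hc1
  · omega
  · rcases hpair i.toNat k.toNat hiL hkL (by omega) with hc2 | hc2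
    · omega
    · omega

-- 2*m1 + m2 is itself a candidate sum
theorem cand_mem (arr : List Int) (m1 m2 : Int) (h : TTInv arr m1 m2) :
    Cand arr (2 * m1 + m2) := by
  obtain ⟨hle, ⟨t, s, ht, hs, hts, htv, hsv⟩, hub, hpair⟩ := h
  refine ⟨(s : Int), (t : Int), (t : Int), ?_, ?_, ?_, by omega, by omega, ?_⟩
  · rw [PySem.List.mem_pyRange_one]; omega
  · rw [PySem.List.mem_pyRange_one]; omega
  · rw [PySem.List.mem_pyRange_one]; omega
  · simp only [candSum, PySem.List.pyGetD_natCast, htv, hsv]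
    ring

theorem altB_char (a b : Int) (rest : List Int) :
    ∃ m1 m2, TTInv (a :: b :: rest) m1 m2 ∧ ver_max_alt (a :: b :: rest) = max 0 (2 * m1 + m2) := by
  have h0 := inv_init a b
  have h := topTwo_inv rest [a, b] _ _ h0
  refine ⟨(topTwo rest (if a ≥ b then a else b) (if a ≥ b then b else a)).1,
          (topTwo rest (if a ≥ b then a else b) (if a ≥ b then b else a)).2, by simpa using h, ?_⟩
  by_cases hab : a ≥ b <;> simp [ver_max_alt, hab]

-- ===== VERDICT (by name: the statement is the Claim_ definition above) =====
theorem ver_max_spec : Claim_equal_ver_max := by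
  intro arr _
  unfold Spec_ver_max
  match arr with
  | [] => simp [ver_max, ver_max_alt, PySem.List.pyRange_one_eq_nil]
  | [a] =>
    have h1 : PySem.List.pyRange (0 : Int) 1 1 = [0] := by decide
    simp [ver_max, ver_max_alt, h1]
  | a :: b :: rest =>
    obtain ⟨m1, m2, hinv, hB⟩ := altB_char a b rest
    obtain ⟨hA0, hAub, hAmem⟩ := verMax_char (a :: b :: rest)
    have hle : ver_max (a :: b :: rest) ≤ ver_max_alt (a :: b :: rest) := by
      rcases hAmem with h | h
      · rw [h, hB]; exact le_max_left _ _
      · rw [hB]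
        exact le_trans (cand_le _ _ _ hinv _ h) (le_max_right _ _)
    have hge : ver_max_alt (a :: b :: rest) ≤ ver_max (a :: b :: rest) := by
      rw [hB]
      exact max_le hA0 (hAub _ (cand_mem _ _ _ hinv))
    omega
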